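-- pv_equiv track=rewrite | github.com/mithro/tmds_encoding | bit_utils.py | token_min_distance
-- ===== SOURCE A (Python) =====
-- def xor(a, b):
--     """xor bits together.
--
--     >>> assert xor(0, 0) == 0
--     >>> assert xor(0, 1) == 1
--     >>> assert xor(1, 0) == 1
--     >>> assert xor(1, 1) == 0
--     """
--     assert a in (0, 1)
--     assert b in (0, 1)
--     if a == b:
--         return 0
--     else:
--         return 1
--
-- def hamming(a, b):
--     """
--     Return the hamming distance between to bit sequences.
--
--     >>> assert hamming((0, 0), (1, 1)) == 2
--     >>> assert hamming((0, 0), (1, 0)) == 1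
--     >>> assert hamming((0, 0), (0, 1)) == 1
--     >>> assert hamming((0, 0), (0, 0)) == 0
--     """
--     return sum(xor(b1, b2) for b1, b2 in zip(a, b))
--
-- def token_min_distance(token, other_tokens):
--     min_distance = len(token)+1
--
--     close_tokens = None
--     for otoken in other_tokens:
--         distance = hamming(token, otoken)
--         if distance < min_distance:
--             min_distance = distance
--             close_tokens = [otoken]
--         elif distance == min_distance:
--             close_tokens.append(otoken)
--
--     return min_distance, close_tokens
-- ===== SOURCE B (Python) =====
-- def xor(a, b):
--     assert a in (0, 1)
--     assert b in (0, 1)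
--     if a == b:
--         return 0
--     else:
--         return 1
--
-- def hamming(a, b):
--     return sum(xor(b1, b2) for b1, b2 in zip(a, b))
--
-- def token_min_distance(token, other_tokens):
--     others = list(other_tokens)
--     distances = [hamming(token, otoken) for otoken in others]
--     if not distances:
--         return len(token) + 1, None
--     m = min(distances)
--     return m, [otoken for otoken, d in zip(others, distances) if d == m]
-- ===== Notes on version B (the rewrite author's own statement) =====
-- stated objective: alternative
-- what changed: Replaced A's single running-min scan with mutable state (min_distance + close_tokens rebuilt/appended in-place) by a two-pass shape: build the full list of Hamming distances once, take its min in a second pass, then select the tokens at that distance with a filter.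
import Mathlib
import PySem

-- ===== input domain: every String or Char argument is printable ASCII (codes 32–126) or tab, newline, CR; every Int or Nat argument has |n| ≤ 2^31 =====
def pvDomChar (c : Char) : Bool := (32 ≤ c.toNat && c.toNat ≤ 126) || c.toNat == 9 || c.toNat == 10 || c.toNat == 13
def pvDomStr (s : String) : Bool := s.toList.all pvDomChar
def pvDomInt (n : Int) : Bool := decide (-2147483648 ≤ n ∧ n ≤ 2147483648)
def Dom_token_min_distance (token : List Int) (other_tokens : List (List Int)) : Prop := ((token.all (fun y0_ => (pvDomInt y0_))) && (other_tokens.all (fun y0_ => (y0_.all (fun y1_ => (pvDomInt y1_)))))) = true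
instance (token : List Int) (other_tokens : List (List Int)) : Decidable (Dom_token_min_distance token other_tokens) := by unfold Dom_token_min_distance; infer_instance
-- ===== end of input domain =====

-- B replaces A's single running-min scan over mutable state by a two-pass shape
-- (build all distances, take the min, filter the tokens at the min); same cost, no speed claim.

-- ===== PORT A =====
-- xor(a, b): the asserts raise outside {0,1}; those inputs are excluded by Pre_ below.
def pyXor (a b : Int) : Int := if a = b then 0 else 1

-- hamming(a, b) = sum(xor(b1, b2) for b1, b2 in zip(a, b))
def pyHamming (a b : List Int) : Int := ((a.zip b).map (fun p => pyXor p.1 p.2)).sum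

-- the loop body of A (close_tokens.append on a None close_tokens is unreachable:
-- every distance is < len(token)+1, so the first iteration always takes the '<' branch;
-- getD [] is only ever applied to a 'some' state)
def stepA (token : List Int) (st : Int × Option (List (List Int))) (otoken : List Int) :
    Int × Option (List (List Int)) :=
  let distance := pyHamming token otoken
  if distance < st.1 then (distance, some [otoken])
  else if distance = st.1 then (st.1, some ((st.2.getD []) ++ [otoken]))
  else st

def token_min_distance (token : List Int) (other_tokens : List (List Int)) :
    Int × Option (List (List Int)) :=
  other_tokens.foldl (stepA token) (((token.length : Int) + 1), none)

-- ===== PORT B =====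
def token_min_distance_alt (token : List Int) (other_tokens : List (List Int)) :
    Int × Option (List (List Int)) :=
  let distances := other_tokens.map (fun otoken => pyHamming token otoken)
  match distances with
  | [] => (((token.length : Int) + 1), none)
  | d :: ds =>
    let m := ds.foldl min d      -- min(distances)
    (m, some (((other_tokens.zip distances).filter (fun p => p.2 = m)).map Prod.fst))

-- ===== PRECONDITION & SPEC =====
-- Pre_ excludes exactly the inputs where xor's asserts fire (a zipped bit not in {0,1});
-- Python A raises AssertionError there.
def Pre_token_min_distance (token : List Int) (other_tokens : List (List Int)) : Prop :=
  ∀ o ∈ other_tokens, ∀ p ∈ token.zip o, (p.1 = 0 ∨ p.1 = 1) ∧ (p.2 = 0 ∨ p.2 = 1)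
instance (token : List Int) (other_tokens : List (List Int)) : Decidable (Pre_token_min_distance token other_tokens) := by unfold Pre_token_min_distance; infer_instance

def pvWitness_token_min_distance : List Int × List (List Int) := ([0, 1], [[1, 1], [0, 1], [1, 0, 0]])

def Spec_token_min_distance (token : List Int) (other_tokens : List (List Int)) (out : Int × Option (List (List Int))) : Prop := out = token_min_distance_alt token other_tokens
instance (token : List Int) (other_tokens : List (List Int)) (out : Int × Option (List (List Int))) : Decidable (Spec_token_min_distance token other_tokens out) := by unfold Spec_token_min_distance; infer_instance

-- ===== CLAIM (what is proved, stated in full; the proofs are below) =====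
def Claim_equal_token_min_distance : Prop := ∀ (token : List Int) (other_tokens : List (List Int)), Dom_token_min_distance token other_tokens → Pre_token_min_distance token other_tokens → Spec_token_min_distance token other_tokens (token_min_distance token other_tokens)

-- ===== LEMMAS AND PROOFS =====

-- every hamming distance is at most len(token), hence < len(token)+1
theorem pyHamming_le (token o : List Int) : pyHamming token o ≤ (token.length : Int) := by
  have h1 : pyHamming token o ≤ ((token.zip o).length : Int) := by
    unfold pyHamming
    calc ((token.zip o).map (fun p => pyXor p.1 p.2)).sum
        ≤ (((token.zip o).map (fun p => pyXor p.1 p.2)).length : Int) * 1 := by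
          apply List.sum_le_card_nsmul
          intro x hx
          simp only [List.mem_map] at hx
          obtain ⟨p, _, rfl⟩ := hx
          simp only [pyXor]; split <;> simp
      _ = ((token.zip o).length : Int) := by simp
  have h2 : (token.zip o).length ≤ token.length := by
    simp [List.length_zip]
  omega

theorem foldl_min_le (token : List Int) (l : List (List Int)) (a : Int) :
    l.foldl (fun a o => min a (pyHamming token o)) a ≤ a := by
  induction l generalizing a with
  | nil => simp
  | cons x xs ih => exact le_trans (ih (min a (pyHamming token x))) (min_le_left _ _)

-- A's fold from any 'some' state, characterized: the resulting min and the filtered list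
theorem foldA_some (token : List Int) (l : List (List Int)) :
    ∀ (m : Int) (cs : List (List Int)),
    l.foldl (stepA token) (m, some cs) =
      (l.foldl (fun a o => min a (pyHamming token o)) m,
       some ((if l.foldl (fun a o => min a (pyHamming token o)) m = m then cs else []) ++
             l.filter (fun o => pyHamming token o = (l.foldl (fun a o => min a (pyHamming token o)) m)))) := by
  induction l with
  | nil => intro m cs; simp
  | cons o rest ih =>
    intro m cs
    simp only [List.foldl_cons]
    by_cases h1 : pyHamming token o < m
    · have hm : min m (pyHamming token o) = pyHamming token o := by omega
      have hs : stepA token (m, some cs) o = (pyHamming token o, some [o]) := by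
        simp [stepA, h1]
      rw [hs, ih (pyHamming token o) [o]]
      simp only [hm]
      have hle := foldl_min_le token rest (pyHamming token o)
      set m' := rest.foldl (fun a o => min a (pyHamming token o)) (pyHamming token o) with hm'
      have hne : m' ≠ m := by omega
      simp only [hne, if_false, List.nil_append]
      by_cases h2 : m' = pyHamming token o
      · have h2' : pyHamming token o = m' := h2.symm
        simp [h2']
      · have h2' : ¬ (pyHamming token o = m') := fun h => h2 h.symm
        simp [h2, h2']
    · have hm : min m (pyHamming token o) = m := by omega
      by_cases h2 : pyHamming token o = m
      · have hs : stepA token (m, some cs) o = (m, some (cs ++ [o])) := by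
          simp [stepA, h2]
        rw [hs, ih m (cs ++ [o])]
        simp only [hm]
        set m' := rest.foldl (fun a o => min a (pyHamming token o)) m with hm'
        by_cases h3 : m' = m
        · have h2' : pyHamming token o = m' := by omega
          simp [h3, h2', List.append_assoc]
        · have h2' : ¬ (pyHamming token o = m') := by omega
          simp [h3, h2']
      · have hs : stepA token (m, some cs) o = (m, some cs) := by
          simp [stepA, h1, h2]
        rw [hs, ih m cs]
        simp only [hm]
        set m' := rest.foldl (fun a o => min a (pyHamming token o)) m with hm'
        have hle := foldl_min_le token rest m
        have h2' : ¬ (pyHamming token o = m') := by omega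
        simp [h2']

-- B's zip-with-distances filter is a plain filter on the tokens
theorem filter_zip_map (token : List Int) (m : Int) (l : List (List Int)) :
    ((l.zip (l.map (fun otoken => pyHamming token otoken))).filter (fun p => p.2 = m)).map Prod.fst =
      l.filter (fun o => pyHamming token o = m) := by
  induction l with
  | nil => simp
  | cons o rest ih =>
    simp only [List.map_cons, List.zip_cons_cons, List.filter_cons]
    by_cases h : pyHamming token o = m
    · simp [h, ih]
    · simp [h, ih]

-- ===== VERDICT (by name: the statement is the Claim_ definition above) =====
theorem token_min_distance_spec : Claim_equal_token_min_distance := by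
  intro token other_tokens _ _
  unfold Spec_token_min_distance token_min_distance token_min_distance_alt
  cases other_tokens with
  | nil => simp
  | cons o rest =>
    have hmap : (o :: rest).map (fun otoken => pyHamming token otoken) =
        pyHamming token o :: rest.map (fun otoken => pyHamming token otoken) := rfl
    simp only [hmap, List.foldl_cons]
    have h0 : pyHamming token o < (token.length : Int) + 1 := by
      have := pyHamming_le token o; omega
    have hstep : stepA token (((token.length : Int) + 1), none) o = (pyHamming token o, some [o]) := by
      simp [stepA, h0]
    rw [hstep, foldA_some, List.foldl_map, ← hmap, filter_zip_map]
    set m' := rest.foldl (fun a o => min a (pyHamming token o)) (pyHamming token o) with hm'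
    simp only [List.filter_cons]
    by_cases h : m' = pyHamming token o
    · have h' : pyHamming token o = m' := h.symm
      simp [h']
    · have h' : ¬ (pyHamming token o = m') := fun hx => h hx.symm
      simp [h, h']
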